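-- pv_equiv track=rewrite | github.com/dinkoprim/SoftUni_courses | 2_Python_fundamentals/exam_prep/the_lift.py | distribute_people
-- ===== SOURCE A (Python) =====
-- def distribute_people(people, lift):
--     for i in range(len(lift)):
--         while lift[i] < 4 and people > 0:
--             lift[i] += 1
--             people -= 1
--             if people == 0 or lift_is_full(lift):
--                 return people, lift
--     return people, lift
--
-- def lift_is_full(lift):
--     return all(wagon == 4 for wagon in lift)
-- ===== SOURCE B (Python) =====
-- def distribute_people(people, lift):
--     # One pass: fill each wagon with min(free space, people) at once; stop when nobody is left.
--     for i in range(len(lift)):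
--         if people <= 0:
--             break
--         space = 4 - lift[i]
--         if space > 0:
--             take = space if space < people else people
--             lift[i] += take
--             people -= take
--     return people, lift
-- ===== Notes on version B (the rewrite author's own statement) =====
-- stated objective: faster
-- what changed: Replaces the per-person inner while loop with its full-lift scan (lift_is_full) per increment by a single pass that adds min(free space, remaining people) to each wagon at once.
import Mathlib
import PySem

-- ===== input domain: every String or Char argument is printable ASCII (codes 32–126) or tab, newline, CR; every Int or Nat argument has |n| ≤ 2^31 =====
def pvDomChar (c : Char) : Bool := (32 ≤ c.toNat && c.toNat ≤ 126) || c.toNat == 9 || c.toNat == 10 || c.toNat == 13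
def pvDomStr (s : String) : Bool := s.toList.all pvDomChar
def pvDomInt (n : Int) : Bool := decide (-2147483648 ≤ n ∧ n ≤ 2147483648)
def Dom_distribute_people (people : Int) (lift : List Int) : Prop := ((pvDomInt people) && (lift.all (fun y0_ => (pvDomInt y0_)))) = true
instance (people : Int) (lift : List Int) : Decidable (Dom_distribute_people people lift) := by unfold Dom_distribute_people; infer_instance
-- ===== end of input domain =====

-- B replaces A's per-person inner while loop (with a full-lift scan per increment) by one
-- O(n) pass adding min(free space, remaining people) per wagon; both mutate `lift` in Python
-- the same way, and the theorem is about the returned (people, lift) value.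


-- ===== PORT A =====
-- all(wagon == 4 for wagon in lift)
def lift_is_full (lift : List Int) : Bool := lift.all (fun wagon => wagon == 4)

-- A's inner `while lift[i] < 4 and people > 0` loop; the Bool is true iff the loop hit the
-- early `return`.  `i` always comes from range(len(lift)), so `getD i 0` is exact indexing.
def dpWhile (people : Int) (lift : List Int) (i : Nat) : Int × List Int × Bool :=
  if lift.getD i 0 < 4 ∧ 0 < people then
    let lift' := lift.set i (lift.getD i 0 + 1)
    let people' := people - 1
    if people' = 0 ∨ lift_is_full lift' then (people', lift', true)
    else dpWhile people' lift' i
  else (people, lift, false)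
termination_by people.toNat
decreasing_by omega

-- A's outer `for i in range(len(lift))` loop over the list of indices
def dpOuter (idxs : List Nat) (people : Int) (lift : List Int) : Int × List Int :=
  match idxs with
  | [] => (people, lift)
  | i :: rest =>
    let r := dpWhile people lift i
    if r.2.2 then (r.1, r.2.1) else dpOuter rest r.1 r.2.1

def distribute_people (people : Int) (lift : List Int) : Int × List Int :=
  dpOuter (List.range lift.length) people lift

-- ===== PORT B =====
-- B's single `for i in range(len(lift))` pass with break; `getD i 0` is exact (i in range)
def dpAlt (idxs : List Nat) (people : Int) (lift : List Int) : Int × List Int :=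
  match idxs with
  | [] => (people, lift)
  | i :: rest =>
    if people ≤ 0 then (people, lift)
    else
      let space := 4 - lift.getD i 0
      if 0 < space then
        let take := if space < people then space else people
        dpAlt rest (people - take) (lift.set i (lift.getD i 0 + take))
      else dpAlt rest people lift

def distribute_people_alt (people : Int) (lift : List Int) : Int × List Int :=
  dpAlt (List.range lift.length) people lift

-- ===== PRECONDITION & SPEC =====
def Spec_distribute_people (people : Int) (lift : List Int) (out : Int × List Int) : Prop := out = distribute_people_alt people lift
instance (people : Int) (lift : List Int) (out : Int × List Int) : Decidable (Spec_distribute_people people lift out) := by unfold Spec_distribute_people; infer_instance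

-- ===== CLAIM (what is proved, stated in full; the proofs are below) =====
def Claim_equal_distribute_people : Prop := ∀ (people : Int) (lift : List Int), Dom_distribute_people people lift → Spec_distribute_people people lift (distribute_people people lift)

-- ===== LEMMAS AND PROOFS =====

lemma getD_mem {l : List Int} {i : Nat} (hi : i < l.length) : l.getD i 0 ∈ l := by
  rw [List.getD_eq_getElem l 0 hi]; exact l.getElem_mem hi

lemma getD_set_self' {l : List Int} {i : Nat} (a : Int) (hi : i < l.length) :
    (l.set i a).getD i 0 = a := by
  rw [List.getD_eq_getElem _ 0 (by simpa using hi)]; simp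

lemma full_getD {l : List Int} {i : Nat} (hi : i < l.length)
    (hf : lift_is_full l = true) : l.getD i 0 = 4 := by
  have := (List.all_eq_true.mp hf) _ (getD_mem hi)
  simpa using this

-- if nobody is left, neither loop changes anything
lemma dpOuter_nonpos (idxs : List Nat) (people : Int) (lift : List Int)
    (h : people ≤ 0) : dpOuter idxs people lift = (people, lift) := by
  induction idxs generalizing lift with
  | nil => rfl
  | cons i rest ih =>
    rw [dpOuter, dpWhile, if_neg (by omega : ¬(lift.getD i 0 < 4 ∧ 0 < people))]
    simpa using ih lift

lemma dpAlt_nonpos (idxs : List Nat) (people : Int) (lift : List Int)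
    (h : people ≤ 0) : dpAlt idxs people lift = (people, lift) := by
  cases idxs with
  | nil => rfl
  | cons i rest => rw [dpAlt, if_pos h]

-- on a full lift B's loop changes nothing (indices in range)
lemma dpAlt_full (idxs : List Nat) (people : Int) (lift : List Int)
    (hr : ∀ i ∈ idxs, i < lift.length) (hf : lift_is_full lift = true) :
    dpAlt idxs people lift = (people, lift) := by
  induction idxs generalizing lift with
  | nil => rfl
  | cons i rest ih =>
    have h4 : lift.getD i 0 = 4 := full_getD (hr i (by simp)) hf
    rw [dpAlt]
    by_cases hp : people ≤ 0
    · rw [if_pos hp]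
    · rw [if_neg hp, h4, if_neg (by omega : ¬(0:Int) < 4 - 4)]
      exact ih lift (fun j hj => hr j (by simp [hj])) hf

-- the inner while loop in one step: it fills wagon i by min(4 - lift[i], people)
lemma dpWhile_spec (people : Int) (lift : List Int) (i : Nat)
    (hw : lift.getD i 0 < 4) (hp : 0 < people) (hi : i < lift.length) :
    dpWhile people lift i =
      (people - min (4 - lift.getD i 0) people,
       lift.set i (lift.getD i 0 + min (4 - lift.getD i 0) people),
       decide (people - min (4 - lift.getD i 0) people = 0 ∨
         lift_is_full (lift.set i (lift.getD i 0 + min (4 - lift.getD i 0) people)) = true)) := by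
  generalize hn : people.toNat = n
  induction n generalizing people lift with
  | zero => omega
  | succ n ih =>
    rw [dpWhile, if_pos ⟨hw, hp⟩]
    have hget : (lift.set i (lift.getD i 0 + 1)).getD i 0 = lift.getD i 0 + 1 :=
      getD_set_self' _ hi
    by_cases hstop : people - 1 = 0 ∨ lift_is_full (lift.set i (lift.getD i 0 + 1)) = true
    · rw [if_pos hstop]
      have htt : min (4 - lift.getD i 0) people = 1 := by
        rcases hstop with h1 | hfull
        · omega
        · have h4 := full_getD (l := lift.set i (lift.getD i 0 + 1)) (by simpa using hi) hfull
          rw [hget] at h4; omega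
      rw [htt, decide_eq_true hstop]
    · rw [if_neg hstop]
      push Not at hstop
      obtain ⟨hp1, hnf⟩ := hstop
      by_cases hw1 : lift.getD i 0 + 1 < 4
      · rw [ih (people - 1) (lift.set i (lift.getD i 0 + 1))
            (by rw [hget]; omega) (by omega) (by simpa using hi) (by omega)]
        rw [hget, List.set_set]
        have e1 : min (4 - (lift.getD i 0 + 1)) (people - 1)
            = min (4 - lift.getD i 0) people - 1 := by omega
        rw [e1]
        have e2 : people - 1 - (min (4 - lift.getD i 0) people - 1)
            = people - min (4 - lift.getD i 0) people := by omega
        have e3 : lift.getD i 0 + 1 + (min (4 - lift.getD i 0) people - 1)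
            = lift.getD i 0 + min (4 - lift.getD i 0) people := by omega
        rw [e2, e3]
      · rw [dpWhile, if_neg (by rw [hget]; omega : ¬((lift.set i (lift.getD i 0 + 1)).getD i 0 < 4 ∧ 0 < people - 1))]
        have htt : min (4 - lift.getD i 0) people = 1 := by omega
        rw [htt, decide_eq_false (by push Not; exact ⟨hp1, hnf⟩)]

-- main step-by-step equivalence of the two loops
lemma dpOuter_eq_dpAlt (idxs : List Nat) (people : Int) (lift : List Int)
    (hr : ∀ i ∈ idxs, i < lift.length) :
    dpOuter idxs people lift = dpAlt idxs people lift := by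
  induction idxs generalizing people lift with
  | nil => rfl
  | cons i rest ih =>
    have hi : i < lift.length := hr i (by simp)
    have hrest : ∀ j ∈ rest, j < lift.length := fun j hj => hr j (by simp [hj])
    by_cases hp : people ≤ 0
    · rw [dpAlt, if_pos hp, dpOuter, dpWhile,
        if_neg (by omega : ¬(lift.getD i 0 < 4 ∧ 0 < people))]
      simpa using dpOuter_nonpos rest people lift hp
    · have hp' : 0 < people := by omega
      by_cases hw : lift.getD i 0 < 4
      · -- wagon has space: A's while loop equals B's single min-step
        rw [dpOuter, dpWhile_spec people lift i hw hp' hi,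
          dpAlt, if_neg hp, if_pos (by omega : (0:Int) < 4 - lift.getD i 0)]
        have htake : (if 4 - lift.getD i 0 < people then 4 - lift.getD i 0 else people)
            = min (4 - lift.getD i 0) people := by split_ifs <;> omega
        rw [htake]
        have hlen : ∀ j ∈ rest,
            j < (lift.set i (lift.getD i 0 + min (4 - lift.getD i 0) people)).length := by
          simpa using hrest
        by_cases hs : people - min (4 - lift.getD i 0) people = 0 ∨
            lift_is_full (lift.set i (lift.getD i 0 + min (4 - lift.getD i 0) people)) = true
        · rw [decide_eq_true hs]
          rcases hs with h0 | hfull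
          · simpa using (dpAlt_nonpos rest (people - min (4 - lift.getD i 0) people)
              (lift.set i (lift.getD i 0 + min (4 - lift.getD i 0) people)) (by omega)).symm
          · simpa using (dpAlt_full rest (people - min (4 - lift.getD i 0) people)
              (lift.set i (lift.getD i 0 + min (4 - lift.getD i 0) people)) hlen hfull).symm
        · rw [decide_eq_false hs]
          simpa using ih (people - min (4 - lift.getD i 0) people) _ hlen
      · -- wagon already full (or over): both skip it
        have hnc : ¬(lift.getD i 0 < 4 ∧ 0 < people) := fun h => hw h.1
        rw [dpOuter, dpWhile, if_neg hnc,
          dpAlt, if_neg hp, if_neg (by omega : ¬(0:Int) < 4 - lift.getD i 0)]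
        simpa using ih people lift hrest

-- ===== VERDICT (by name: the statement is the Claim_ definition above) =====
theorem distribute_people_spec : Claim_equal_distribute_people := by
  intro people lift _
  unfold Spec_distribute_people distribute_people distribute_people_alt
  exact dpOuter_eq_dpAlt _ people lift (fun i hi => List.mem_range.mp hi)
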